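-- pv_equiv track=rewrite | github.com/coremoon/tradfin2simplicity-tutorial | lib/__init__.py | pretty_print_code
-- ===== SOURCE A (Python) =====
-- def pretty_print_code(code, indent_step=2):
--     """
--     Pretty-print a heavily nested expression string.
--     Rules:
--       - Increase indent after '('
--       - Decrease indent after ')'
--       - Break lines at ';' only
--       - Klammern do NOT create new lines
--     """
--     indent = 0
--     i = 0
--     n = len(code)
--     result = ""
--     while i < n:
--         c = code[i]
--         if c == '(':
--             result += '('
--             indent += indent_step
--             i += 1
--         elif c == ')':
--             indent -= indent_step
--             result += ')'
--             i += 1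
--         elif c == ';':
--             result += ';\n' + ' ' * indent
--             i += 1
--         else:
--             result += c
--             i += 1
--
--     # Remove trailing spaces on each line
--     return '\n'.join(line.rstrip() for line in result.split('\n'))
-- ===== SOURCE B (Python) =====
-- def pretty_print_code(code, indent_step=2):
--     """Pretty-print a nested expression: segment-level pass over ';'-separated
--     parts, deriving the indent of each break from the running paren balance."""
--     parts = code.split(';')
--     balance = 0
--     pieces = [parts[0]]
--     for prev, part in zip(parts, parts[1:]):
--         balance += prev.count('(') - prev.count(')')
--         pieces.append(';\n' + ' ' * (indent_step * balance))
--         pieces.append(part)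
--     result = ''.join(pieces)
--     return '\n'.join(line.rstrip() for line in result.split('\n'))
-- ===== Notes on version B (the rewrite author's own statement) =====
-- stated objective: faster
-- what changed: Replaces A's per-character while-loop (which grows the result by repeated string concatenation) by a segment-level pass: split the code on the separator, keep a running paren balance per segment, collect pieces in a list and join once; each break's indent is indent_step * balance.
import Mathlib
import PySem

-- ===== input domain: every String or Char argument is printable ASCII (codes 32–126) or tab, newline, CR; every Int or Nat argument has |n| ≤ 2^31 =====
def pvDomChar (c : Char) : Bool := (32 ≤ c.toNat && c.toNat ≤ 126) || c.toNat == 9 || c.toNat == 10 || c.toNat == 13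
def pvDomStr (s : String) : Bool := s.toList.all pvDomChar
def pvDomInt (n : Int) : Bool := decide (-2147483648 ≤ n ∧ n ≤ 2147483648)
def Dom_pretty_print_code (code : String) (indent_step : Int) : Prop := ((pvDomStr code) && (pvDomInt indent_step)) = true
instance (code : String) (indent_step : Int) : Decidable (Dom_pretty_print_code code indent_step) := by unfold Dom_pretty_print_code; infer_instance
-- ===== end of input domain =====

-- B rewrites A's per-character scan (quadratic string concatenation) as a segment-level
-- pass: split on the separator, derive each break's indent from the running paren balance (measured faster).

-- ===== PORT A =====
-- A's while-loop over code[i], state (indent, result), as structural recursion on the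
-- remaining characters; ' ' * indent with a possibly negative Int is replicate of .toNat (= '').
def pprintLoop (indent_step : Int) : List Char → Int → List Char → List Char
  | [], _, result => result
  | c :: rest, indent, result =>
    if c = '(' then pprintLoop indent_step rest (indent + indent_step) (result ++ ['('])
    else if c = ')' then pprintLoop indent_step rest (indent - indent_step) (result ++ [')'])
    else if c = ';' then
      pprintLoop indent_step rest indent
        (result ++ ';' :: '\n' :: List.replicate indent.toNat ' ')
    else pprintLoop indent_step rest indent (result ++ [c])

def pretty_print_code (code : String) (indent_step : Int) : String :=
  let result := pprintLoop indent_step code.toList 0 []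
  String.ofList (PySem.Chars.join ['\n'] ((PySem.Chars.splitOn result ['\n']).map PySem.Chars.rstrip))

-- ===== PORT B =====
-- B's loop body: accumulate balance from the previous part, append the break and the part.
def pprintStep (indent_step : Int) (st : Int × List (List Char)) (pp : List Char × List Char) :
    Int × List (List Char) :=
  let bal := st.1 + ((PySem.Chars.count pp.1 ['('] : Int) - (PySem.Chars.count pp.1 [')'] : Int))
  (bal, st.2 ++ [';' :: '\n' :: List.replicate (indent_step * bal).toNat ' ', pp.2])

def pretty_print_code_alt (code : String) (indent_step : Int) : String :=
  let parts := PySem.Chars.splitOn code.toList [';']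
  let st := (List.zip parts parts.tail).foldl (pprintStep indent_step) (0, [parts.headI])
  let result := PySem.Chars.join [] st.2
  String.ofList (PySem.Chars.join ['\n'] ((PySem.Chars.splitOn result ['\n']).map PySem.Chars.rstrip))

-- ===== PRECONDITION & SPEC =====
def Spec_pretty_print_code (code : String) (indent_step : Int) (out : String) : Prop := out = pretty_print_code_alt code indent_step
instance (code : String) (indent_step : Int) (out : String) : Decidable (Spec_pretty_print_code code indent_step out) := by unfold Spec_pretty_print_code; infer_instance

-- ===== CLAIM (what is proved, stated in full; the proofs are below) =====
def Claim_equal_pretty_print_code : Prop := ∀ (code : String) (indent_step : Int), Dom_pretty_print_code code indent_step → Spec_pretty_print_code code indent_step (pretty_print_code code indent_step)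

-- ===== LEMMAS AND PROOFS =====

-- simple spec of splitting on one separator character, used to reason about Chars.splitOn
def splitSpec (sep : Char) : List Char → List (List Char)
  | [] => [[]]
  | c :: t => if c = sep then [] :: splitSpec sep t else (splitSpec sep t).modifyHead (c :: ·)

theorem splitSpec_ne_nil (sep : Char) (l : List Char) : splitSpec sep l ≠ [] := by
  cases l with
  | nil => simp [splitSpec]
  | cons c t =>
    simp only [splitSpec]
    split_ifs
    · simp
    · cases h : splitSpec sep t with
      | nil => exact absurd h (splitSpec_ne_nil sep t)
      | cons p ps => simp

theorem splitOn_go_single (sep : Char) (l : List Char) :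
    ∀ (fuel : Nat) (cur : List Char) (acc : List (List Char)), l.length ≤ fuel →
      PySem.Chars.splitOn.go [sep] fuel l cur acc
        = acc.reverse ++ (splitSpec sep l).modifyHead (cur.reverse ++ ·) := by
  induction l with
  | nil =>
    intro fuel cur acc _
    cases fuel <;> simp [PySem.Chars.splitOn.go, splitSpec]
  | cons c t ih =>
    intro fuel cur acc hf
    cases fuel with
    | zero => simp at hf
    | succ f =>
      by_cases hc : c = sep
      · simp only [PySem.Chars.splitOn.go, List.isPrefixOf, hc, beq_self_eq_true,
          Bool.and_self, if_true, List.length_singleton,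
          List.drop_succ_cons, List.drop_zero]
        rw [ih f [] (cur.reverse :: acc) (by simpa using Nat.le_of_succ_le_succ hf)]
        obtain ⟨p, ps, hps⟩ := List.exists_cons_of_ne_nil (splitSpec_ne_nil sep t)
        simp [splitSpec, hps]
      · have hpre : [sep].isPrefixOf (c :: t) = false := by
          simp [List.isPrefixOf]
          exact fun h => absurd h.symm hc
        simp only [PySem.Chars.splitOn.go, hpre, Bool.false_eq_true, if_false]
        rw [ih f (c :: cur) acc (by simpa using Nat.le_of_succ_le_succ hf)]
        obtain ⟨p, ps, hps⟩ := List.exists_cons_of_ne_nil (splitSpec_ne_nil sep t)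
        simp [splitSpec, hc, hps]

theorem splitOn_single (sep : Char) (l : List Char) :
    PySem.Chars.splitOn l [sep] = splitSpec sep l := by
  show PySem.Chars.splitOn.go [sep] (l.length + 1) l [] [] = _
  rw [splitOn_go_single sep l (l.length + 1) [] [] (Nat.le_succ _)]
  obtain ⟨p, ps, hps⟩ := List.exists_cons_of_ne_nil (splitSpec_ne_nil sep l)
  simp [hps]

theorem join_splitSpec (sep : Char) (l : List Char) :
    PySem.Chars.join [sep] (splitSpec sep l) = l := by
  induction l with
  | nil => simp [splitSpec, PySem.Chars.join_singleton]
  | cons c t ih =>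
    simp only [splitSpec]
    split_ifs with hc
    · obtain ⟨p, ps, hps⟩ := List.exists_cons_of_ne_nil (splitSpec_ne_nil sep t)
      rw [hps] at ih ⊢
      rw [PySem.Chars.join_cons_cons]
      simp [ih, hc]
    · obtain ⟨p, ps, hps⟩ := List.exists_cons_of_ne_nil (splitSpec_ne_nil sep t)
      rw [hps] at ih ⊢
      cases ps with
      | nil => simpa [PySem.Chars.join_singleton] using congrArg (c :: ·) ih
      | cons q qs =>
        rw [PySem.Chars.join_cons_cons] at ih
        rw [List.modifyHead_cons, PySem.Chars.join_cons_cons]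
        simpa using congrArg (c :: ·) ih

theorem splitSpec_free (sep : Char) (l : List Char) :
    ∀ p ∈ splitSpec sep l, sep ∉ p := by
  induction l with
  | nil => simp [splitSpec]
  | cons c t ih =>
    simp only [splitSpec]
    split_ifs with hc
    · intro p hp
      rcases List.mem_cons.mp hp with rfl | hp
      · simp
      · exact ih p hp
    · obtain ⟨q, qs, hqs⟩ := List.exists_cons_of_ne_nil (splitSpec_ne_nil sep t)
      rw [hqs, List.modifyHead_cons]
      intro p hp
      rcases List.mem_cons.mp hp with rfl | hp
      · have hq := ih q (by rw [hqs]; exact List.mem_cons_self)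
        intro hmem
        rcases List.mem_cons.mp hmem with h | h
        · exact hc h.symm
        · exact hq h
      · exact ih p (by rw [hqs]; exact List.mem_cons_of_mem _ hp)

-- Chars.count with a single-character needle is List.count
theorem count_go_single (c : Char) (l : List Char) :
    ∀ (fuel : Nat) (acc : Nat), l.length ≤ fuel →
      PySem.Chars.count.go [c] fuel l acc = acc + l.count c := by
  induction l with
  | nil => intro fuel acc _; cases fuel <;> simp [PySem.Chars.count.go]
  | cons d t ih =>
    intro fuel acc hf
    cases fuel with
    | zero => simp at hf
    | succ f =>
      by_cases hd : d = c
      · simp only [PySem.Chars.count.go, List.isPrefixOf, hd, beq_self_eq_true, Bool.and_self,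
          if_true, List.length_singleton, List.drop_succ_cons, List.drop_zero]
        rw [ih f (acc + 1) (by simpa using Nat.le_of_succ_le_succ hf)]
        simp
        omega
      · have hpre : [c].isPrefixOf (d :: t) = false := by
          simp [List.isPrefixOf]
          exact fun h => absurd h.symm hd
        simp only [PySem.Chars.count.go, hpre, Bool.false_eq_true, if_false]
        rw [ih f acc (by simpa using Nat.le_of_succ_le_succ hf)]
        simp [hd]

theorem count_single (c : Char) (l : List Char) :
    PySem.Chars.count l [c] = l.count c := by
  show PySem.Chars.count.go [c] l.length l 0 = _
  rw [count_go_single c l l.length 0 le_rfl]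
  simp

theorem join_nil_flatten (ps : List (List Char)) : PySem.Chars.join [] ps = ps.flatten := by
  induction ps with
  | nil => simp [PySem.Chars.join_nil]
  | cons p qs ih =>
    cases qs with
    | nil => simp [PySem.Chars.join_singleton]
    | cons q rs => rw [PySem.Chars.join_cons_cons]; simp [ih]

-- B's fold: the accumulated pieces list factors out
theorem pprintStep_acc (indent_step : Int) (l : List (List Char × List Char)) :
    ∀ (b : Int) (acc : List (List Char)),
      l.foldl (pprintStep indent_step) (b, acc)
        = ((l.foldl (pprintStep indent_step) (b, [])).1,
           acc ++ (l.foldl (pprintStep indent_step) (b, [])).2) := by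
  induction l with
  | nil => simp
  | cons pp t ih =>
    intro b acc
    simp only [List.foldl_cons]
    rw [ih _ (pprintStep indent_step (b, acc) pp).2,
        ih _ (pprintStep indent_step (b, []) pp).2]
    simp [pprintStep]

-- A over a ';'-free segment copies it verbatim, shifting the indent by step per paren
theorem pprintLoop_seg (indent_step : Int) (seg : List Char) (hfree : ';' ∉ seg) :
    ∀ (rest : List Char) (indent : Int) (result : List Char),
      pprintLoop indent_step (seg ++ rest) indent result
        = pprintLoop indent_step rest
            (indent + indent_step * ((seg.count '(' : Int) - (seg.count ')' : Int)))
            (result ++ seg) := by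
  induction seg with
  | nil => intro rest indent result; simp
  | cons c t ih =>
    intro rest indent result
    have hct : ';' ∉ t := fun h => hfree (List.mem_cons_of_mem _ h)
    have hc : c ≠ ';' := fun h => hfree (h ▸ List.mem_cons_self)
    by_cases h1 : c = '('
    · subst h1
      simp only [List.cons_append, pprintLoop, if_true]
      rw [ih hct rest (indent + indent_step) (result ++ ['('])]
      congr 1
      · simp; ring
      · simp
    · by_cases h2 : c = ')'
      · subst h2
        simp only [List.cons_append, pprintLoop, if_true, if_false,
          Char.reduceEq, h1]
        rw [ih hct rest (indent - indent_step) (result ++ [')'])]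
        congr 1
        · simp; ring
        · simp
      · simp only [List.cons_append, pprintLoop, h1, h2, hc, if_false]
        rw [ih hct rest indent (result ++ [c])]
        congr 1
        · simp [h1, h2]
        · simp

-- main correspondence: A's scan of the joined parts = B's fold over consecutive parts
theorem pprint_main (indent_step : Int) (p : List Char) (ps : List (List Char))
    (hfree : ∀ q ∈ p :: ps, ';' ∉ q) :
    ∀ (b : Int) (result : List Char),
      pprintLoop indent_step (PySem.Chars.join [';'] (p :: ps)) (indent_step * b) result
        = result ++ p ++
            ((List.zip (p :: ps) ps).foldl (pprintStep indent_step) (b, [])).2.flatten := by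
  induction ps generalizing p with
  | nil =>
    intro b result
    simp only [PySem.Chars.join_singleton, List.zip_nil_right, List.foldl_nil, List.flatten_nil]
    have h := pprintLoop_seg indent_step p (hfree p (by simp)) [] (indent_step * b) result
    simp only [List.append_nil] at h
    rw [h]
    simp [pprintLoop]
  | cons q qs ih =>
    intro b result
    have hsplit : PySem.Chars.join [';'] (p :: q :: qs)
        = p ++ ';' :: PySem.Chars.join [';'] (q :: qs) := by
      rw [PySem.Chars.join_cons_cons]; simp
    rw [hsplit, pprintLoop_seg indent_step p (hfree p (by simp)) _ _ result]
    set d : Int := (p.count '(' : Int) - (p.count ')' : Int) with hd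
    have harith : indent_step * b + indent_step * d = indent_step * (b + d) := by ring
    rw [harith]
    simp only [pprintLoop, Char.reduceEq, if_false, if_true]
    rw [ih q (fun r hr => hfree r (by simpa using Or.inr hr)) (b + d)]
    simp only [List.zip_cons_cons, List.foldl_cons]
    have hstep : pprintStep indent_step (b, []) (p, q)
        = (b + d, [';' :: '\n' :: List.replicate (indent_step * (b + d)).toNat ' ', q]) := by
      simp [pprintStep, hd, count_single]
    rw [hstep, pprintStep_acc indent_step ((q :: qs).zip qs) (b + d)
        [';' :: '\n' :: List.replicate (indent_step * (b + d)).toNat ' ', q]]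
    simp

-- ===== VERDICT (by name: the statement is the Claim_ definition above) =====
theorem pretty_print_code_spec : Claim_equal_pretty_print_code := by
  intro code indent_step _
  unfold Spec_pretty_print_code pretty_print_code pretty_print_code_alt
  obtain ⟨p, ps, hps⟩ := List.exists_cons_of_ne_nil (splitSpec_ne_nil ';' code.toList)
  have hsplit : PySem.Chars.splitOn code.toList [';'] = p :: ps := by
    rw [splitOn_single]; exact hps
  have hcode : code.toList = PySem.Chars.join [';'] (p :: ps) := by
    conv_lhs => rw [← join_splitSpec ';' code.toList, hps]
  have hfree : ∀ q ∈ p :: ps, ';' ∉ q := by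
    rw [← hps]; exact splitSpec_free ';' code.toList
  simp only [hsplit, List.headI, List.tail_cons]
  have hm := pprint_main indent_step p ps hfree 0 []
  rw [mul_zero] at hm
  rw [hcode, hm]
  rw [pprintStep_acc indent_step ((p :: ps).zip ps) 0 [p], join_nil_flatten]
  simp
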